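-- pv_equiv track=rewrite | github.com/whouey/coding-practice | python/2029.stone-game-ix.py | stoneGameIX
-- ===== SOURCE A (Python) =====
-- from typing import List
--
-- def stoneGameIX(stones: List[int]) -> bool:
--     outcome = False
--
--     trimmed = [x % 3 for x in stones]
--     counts = { k:trimmed.count(k) for k in [x for x in range(3)] }
--     total = 0
--
--     total_count = len(stones)
--     while total_count > 0:
--         if total == 0: # first step
--             if counts[0] % 2 == 0:
--                 if counts[1] < counts[2]:
--                     if counts[1] > 0:
--                         counts[1] -= 1
--                         total = (total + 1) % 3
--                     else:
--                         return outcome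
--                 else:
--                     if counts[2] > 0:
--                         counts[2] -= 1
--                         total = (total + 2) % 3
--                     else:
--                         return outcome
--             else:
--                 if counts[1] > counts[2]:
--                     if counts[1] > 0:
--                         counts[1] -= 1
--                         total = (total + 1) % 3
--                     else:
--                         return outcome
--                 else:
--                     if counts[2] > 0:
--                         counts[2] -= 1
--                         total = (total + 2) % 3
--                     else:
--                         return outcome
--         elif total == 1:
--             if counts[1] > 0:
--                 counts[1] -= 1
--                 total = (total + 1) % 3
--             elif counts[0] > 0:
--                 counts[0] -= 1
--             else:
--                 return outcome
--         else:
--             if counts[2] > 0: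
--                 counts[2] -= 1
--                 total = (total + 2) % 3
--             elif counts[0] > 0:
--                 counts[0] -= 1
--             else:
--                 return outcome
--
--         outcome = not outcome
--         total_count -= 1
--
--     return False
-- ===== SOURCE B (Python) =====
-- from typing import List
--
-- def stoneGameIX(stones: List[int]) -> bool:
--     c0 = c1 = c2 = 0
--     for x in stones:
--         r = x % 3
--         if r == 0:
--             c0 += 1
--         elif r == 1:
--             c1 += 1
--         else:
--             c2 += 1
--     if c0 % 2 == 0:
--         return c1 > 0 and c2 > 0
--     return abs(c1 - c2) > 2
-- ===== Notes on version B (the rewrite author's own statement) =====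
-- stated objective: simpler
-- what changed: Replaced the whole greedy while-loop simulation over a mod-3 counts dict by a single counting pass plus the closed-form verdict: if cnt0 is even the first player wins iff cnt1>0 and cnt2>0, otherwise iff |cnt1-cnt2|>2.
import Mathlib
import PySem

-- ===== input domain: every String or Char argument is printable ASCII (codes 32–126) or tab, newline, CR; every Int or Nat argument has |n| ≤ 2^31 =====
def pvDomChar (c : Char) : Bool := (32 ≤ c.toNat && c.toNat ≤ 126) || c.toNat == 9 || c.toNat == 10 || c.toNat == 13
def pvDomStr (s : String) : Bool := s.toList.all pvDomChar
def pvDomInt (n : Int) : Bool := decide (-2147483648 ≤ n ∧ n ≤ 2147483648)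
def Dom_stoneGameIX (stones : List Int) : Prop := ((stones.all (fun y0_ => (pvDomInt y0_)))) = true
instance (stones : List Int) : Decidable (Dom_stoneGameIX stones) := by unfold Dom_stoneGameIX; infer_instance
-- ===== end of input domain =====

-- B replaces A's greedy while-loop simulation by a one-pass count and a closed-form verdict (simpler).

-- ===== PORT A =====
-- the while-loop: fuel is total_count = len(stones); counts[k] is read with getD (exact: keys 0,1,2 are always present)
def pvLoopA : Nat → PySem.Dict Int Int → Int → Bool → Bool
  | 0, _, _, _ => false
  | Nat.succ n, counts, total, outcome =>
    if total = 0 then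
      if PySem.Int.mod (counts.getD 0 0) 2 = 0 then
        if counts.getD 1 0 < counts.getD 2 0 then
          if counts.getD 1 0 > 0 then
            pvLoopA n (counts.insert 1 (counts.getD 1 0 - 1)) (PySem.Int.mod (total + 1) 3) (!outcome)
          else outcome
        else
          if counts.getD 2 0 > 0 then
            pvLoopA n (counts.insert 2 (counts.getD 2 0 - 1)) (PySem.Int.mod (total + 2) 3) (!outcome)
          else outcome
      else
        if counts.getD 1 0 > counts.getD 2 0 then
          if counts.getD 1 0 > 0 then
            pvLoopA n (counts.insert 1 (counts.getD 1 0 - 1)) (PySem.Int.mod (total + 1) 3) (!outcome)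
          else outcome
        else
          if counts.getD 2 0 > 0 then
            pvLoopA n (counts.insert 2 (counts.getD 2 0 - 1)) (PySem.Int.mod (total + 2) 3) (!outcome)
          else outcome
    else if total = 1 then
      if counts.getD 1 0 > 0 then
        pvLoopA n (counts.insert 1 (counts.getD 1 0 - 1)) (PySem.Int.mod (total + 1) 3) (!outcome)
      else if counts.getD 0 0 > 0 then
        pvLoopA n (counts.insert 0 (counts.getD 0 0 - 1)) total (!outcome)
      else outcome
    else
      if counts.getD 2 0 > 0 then
        pvLoopA n (counts.insert 2 (counts.getD 2 0 - 1)) (PySem.Int.mod (total + 2) 3) (!outcome)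
      else if counts.getD 0 0 > 0 then
        pvLoopA n (counts.insert 0 (counts.getD 0 0 - 1)) total (!outcome)
      else outcome

def stoneGameIX (stones : List Int) : Bool :=
  let trimmed := stones.map (fun x => PySem.Int.mod x 3)
  let counts := ((PySem.List.pyRange 0 3 1).map (fun x => x)).foldl
      (fun d k => d.insert k ((trimmed.count k : Int))) PySem.Dict.empty
  pvLoopA stones.length counts 0 false

-- ===== PORT B =====
def stoneGameIX_alt (stones : List Int) : Bool :=
  let p := stones.foldl (fun (p : Int × Int × Int) x =>
      let r := PySem.Int.mod x 3
      if r = 0 then (p.1 + 1, p.2.1, p.2.2)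
      else if r = 1 then (p.1, p.2.1 + 1, p.2.2)
      else (p.1, p.2.1, p.2.2 + 1)) (0, 0, 0)
  if PySem.Int.mod p.1 2 = 0 then decide (p.2.1 > 0) && decide (p.2.2 > 0)
  else decide (|p.2.1 - p.2.2| > 2)

-- ===== PRECONDITION & SPEC =====
def Spec_stoneGameIX (stones : List Int) (out : Bool) : Prop := out = stoneGameIX_alt stones
instance (stones : List Int) (out : Bool) : Decidable (Spec_stoneGameIX stones out) := by unfold Spec_stoneGameIX; infer_instance

-- ===== CLAIM (what is proved, stated in full; the proofs are below) =====
def Claim_equal_stoneGameIX : Prop := ∀ (stones : List Int), Dom_stoneGameIX stones → Spec_stoneGameIX stones (stoneGameIX stones)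

-- ===== LEMMAS AND PROOFS =====

-- A's loop on the pure triple (cnt0, cnt1, cnt2) instead of the dict
def pvLoopT : Nat → Int → Int → Int → Int → Bool → Bool
  | 0, _, _, _, _, _ => false
  | Nat.succ n, a, b, c, total, outcome =>
    if total = 0 then
      if PySem.Int.mod a 2 = 0 then
        if b < c then
          if b > 0 then pvLoopT n a (b - 1) c (PySem.Int.mod (total + 1) 3) (!outcome) else outcome
        else
          if c > 0 then pvLoopT n a b (c - 1) (PySem.Int.mod (total + 2) 3) (!outcome) else outcome
      else
        if b > c then
          if b > 0 then pvLoopT n a (b - 1) c (PySem.Int.mod (total + 1) 3) (!outcome) else outcome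
        else
          if c > 0 then pvLoopT n a b (c - 1) (PySem.Int.mod (total + 2) 3) (!outcome) else outcome
    else if total = 1 then
      if b > 0 then pvLoopT n a (b - 1) c (PySem.Int.mod (total + 1) 3) (!outcome)
      else if a > 0 then pvLoopT n (a - 1) b c total (!outcome)
      else outcome
    else
      if c > 0 then pvLoopT n a b (c - 1) (PySem.Int.mod (total + 2) 3) (!outcome)
      else if a > 0 then pvLoopT n (a - 1) b c total (!outcome)
      else outcome

lemma pvLoopA_eq_pvLoopT : ∀ (n : Nat) (d : PySem.Dict Int Int) (total : Int) (o : Bool),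
    pvLoopA n d total o = pvLoopT n (d.getD 0 0) (d.getD 1 0) (d.getD 2 0) total o := by
  intro n
  induction n with
  | zero => intro d total o; rfl
  | succ n ih =>
    intro d total o
    simp only [pvLoopA, pvLoopT]
    split_ifs <;> simp [ih, PySem.Dict.getD_insert]

-- closed forms of the loop at total = 1 and total = 2
def pvF1 (a b c : Int) (o : Bool) : Bool :=
  if (PySem.Int.mod a 2 = 0) = (o = false) then decide (c + 2 ≤ b) else decide (b + 1 ≤ c)
def pvF2 (a b c : Int) (o : Bool) : Bool :=
  if (PySem.Int.mod a 2 = 0) = (o = false) then decide (b + 2 ≤ c) else decide (c + 1 ≤ b)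

lemma pvMod2 (a : Int) : PySem.Int.mod a 2 = a % 2 := PySem.Int.mod_eq_emod_of_pos (by omega)
lemma pvMod12 : PySem.Int.mod (1 + 1) 3 = 2 := by decide
lemma pvMod22 : PySem.Int.mod (2 + 2) 3 = 1 := by decide
lemma pvMod01 : PySem.Int.mod (0 + 1) 3 = 1 := by decide
lemma pvMod02 : PySem.Int.mod (0 + 2) 3 = 2 := by decide

lemma pvLoopT_run : ∀ (n : Nat) (a b c : Int) (o : Bool), 0 ≤ a → 0 ≤ b → 0 ≤ c →
    (a + b + c).toNat = n →
    pvLoopT n a b c 1 o = pvF1 a b c o ∧ pvLoopT n a b c 2 o = pvF2 a b c o := by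
  intro n
  induction n with
  | zero =>
    intro a b c o ha hb hc hn
    have h0 : a = 0 ∧ b = 0 ∧ c = 0 := by omega
    obtain ⟨rfl, rfl, rfl⟩ := h0
    cases o <;> simp [pvLoopT, pvF1, pvF2]
  | succ n ih =>
    intro a b c o ha hb hc hn
    constructor
    · simp only [pvLoopT]
      norm_num [pvMod12]
      by_cases hbp : b > 0
      · simp only [hbp, if_true]
        rw [(ih a (b - 1) c (!o) ha (by omega) hc (by omega)).2]
        simp only [pvF1, pvF2, pvMod2]
        cases o <;> by_cases hp : a % 2 = 0 <;>
          simp [hp, decide_eq_decide] <;> omega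
      · have hb0 : b = 0 := by omega
        simp only [hbp, if_false]
        by_cases hap : a > 0
        · simp only [hap, if_true]
          rw [(ih (a - 1) b c (!o) (by omega) hb hc (by omega)).1]
          simp only [pvF1, pvMod2]
          have hpar : ((a - 1) % 2 = 0) ↔ ¬ (a % 2 = 0) := by omega
          cases o <;> by_cases hp : a % 2 = 0 <;>
            simp [hp, hb0, hpar, decide_eq_decide]
        · have ha0 : a = 0 := by omega
          have hc1 : 1 ≤ c := by omega
          simp only [hap, if_false]
          simp only [pvF1, ha0, hb0, pvMod2]
          cases o <;> simp <;> omega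
    · simp only [pvLoopT]
      norm_num [pvMod22]
      by_cases hcp : c > 0
      · simp only [hcp, if_true]
        rw [(ih a b (c - 1) (!o) ha hb (by omega) (by omega)).1]
        simp only [pvF1, pvF2, pvMod2]
        cases o <;> by_cases hp : a % 2 = 0 <;>
          simp [hp, decide_eq_decide] <;> omega
      · have hc0 : c = 0 := by omega
        simp only [hcp, if_false]
        by_cases hap : a > 0
        · simp only [hap, if_true]
          rw [(ih (a - 1) b c (!o) (by omega) hb hc (by omega)).2]
          simp only [pvF2, pvMod2]
          have hpar : ((a - 1) % 2 = 0) ↔ ¬ (a % 2 = 0) := by omega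
          cases o <;> by_cases hp : a % 2 = 0 <;>
            simp [hp, hc0, hpar, decide_eq_decide]
        · have ha0 : a = 0 := by omega
          have hb1 : 1 ≤ b := by omega
          simp only [hap, if_false]
          simp only [pvF2, ha0, hc0, pvMod2]
          cases o <;> simp <;> omega

-- the whole game from total = 0, outcome = False: B's closed form
lemma pvLoopT_zero (n : Nat) (a b c : Int) (ha : 0 ≤ a) (hb : 0 ≤ b) (hc : 0 ≤ c)
    (hn : (a + b + c).toNat = n) :
    pvLoopT n a b c 0 false =
      (if PySem.Int.mod a 2 = 0 then decide (b > 0) && decide (c > 0) else decide (|b - c| > 2)) := by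
  cases n with
  | zero =>
    have h0 : a = 0 ∧ b = 0 ∧ c = 0 := by omega
    obtain ⟨rfl, rfl, rfl⟩ := h0
    simp [pvLoopT]
  | succ n =>
    simp only [pvLoopT, reduceIte, pvMod01, pvMod02, Bool.not_false]
    by_cases hp : PySem.Int.mod a 2 = 0
    · have hp' : a % 2 = 0 := by rwa [pvMod2] at hp
      simp only [if_pos hp]
      by_cases hbc : b < c
      · simp only [if_pos hbc]
        have hcp : 0 < c := by omega
        by_cases hbp : b > 0
        · simp only [if_pos hbp]
          rw [(pvLoopT_run n a (b - 1) c true ha (by omega) hc (by omega)).1]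
          simp only [pvF1, pvMod2, hp']
          simp [le_of_lt hbc, hbp, hcp]
        · have hb0 : b = 0 := by omega
          simp [hb0]
      · simp only [if_neg hbc]
        by_cases hcp : c > 0
        · simp only [if_pos hcp]
          rw [(pvLoopT_run n a b (c - 1) true ha hb (by omega) (by omega)).2]
          simp only [pvF2, pvMod2, hp']
          have h1 : c ≤ b := by omega
          have h2 : 0 < b := by omega
          simp [h1, h2, hcp]
        · have hc0 : c = 0 := by omega
          simp [hc0]
    · have hp' : ¬ a % 2 = 0 := by rwa [pvMod2] at hp
      simp only [if_neg hp]
      by_cases hbc : b > c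
      · have hbp : b > 0 := by omega
        simp only [if_pos hbc, if_pos hbp]
        rw [(pvLoopT_run n a (b - 1) c true ha (by omega) hc (by omega)).1]
        simp only [pvF1, pvMod2]
        simp [hp', decide_eq_decide]
        rw [show |b - c| = b - c from abs_of_pos (by omega)]
        omega
      · simp only [if_neg hbc]
        by_cases hcp : c > 0
        · simp only [if_pos hcp]
          rw [(pvLoopT_run n a b (c - 1) true ha hb (by omega) (by omega)).2]
          simp only [pvF2, pvMod2]
          simp [hp', decide_eq_decide]
          rw [show |b - c| = -(b - c) from abs_of_nonpos (by omega)]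
          omega
        · have hc0 : c = 0 := by omega
          have hb0 : b = 0 := by omega
          simp [hb0, hc0]

-- every stone's remainder is 0, 1 or 2, so the three counts partition the list
lemma pvMod3_cases (x : Int) : PySem.Int.mod x 3 = 0 ∨ PySem.Int.mod x 3 = 1 ∨ PySem.Int.mod x 3 = 2 := by
  have h1 := PySem.Int.mod_nonneg x (b := 3) (by omega)
  have h2 := PySem.Int.mod_lt x (b := 3) (by omega)
  omega

lemma pvCount_sum (l : List Int) :
    ((l.map (fun x => PySem.Int.mod x 3)).count 0 : Int)
      + ((l.map (fun x => PySem.Int.mod x 3)).count 1 : Int)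
      + ((l.map (fun x => PySem.Int.mod x 3)).count 2 : Int) = (l.length : Int) := by
  induction l with
  | nil => simp
  | cons x t ih =>
    rcases pvMod3_cases x with h | h | h <;>
      simp only [List.map_cons, List.count_cons, List.length_cons, h, beq_iff_eq, reduceIte] <;>
      push_cast <;> omega

-- B's fold computes the three counts
lemma pvFold_counts (l : List Int) : ∀ (i j k : Int),
    l.foldl (fun (p : Int × Int × Int) x =>
      let r := PySem.Int.mod x 3
      if r = 0 then (p.1 + 1, p.2.1, p.2.2)
      else if r = 1 then (p.1, p.2.1 + 1, p.2.2)
      else (p.1, p.2.1, p.2.2 + 1)) (i, j, k)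
    = (i + ((l.map (fun x => PySem.Int.mod x 3)).count 0 : Int),
       j + ((l.map (fun x => PySem.Int.mod x 3)).count 1 : Int),
       k + ((l.map (fun x => PySem.Int.mod x 3)).count 2 : Int)) := by
  induction l with
  | nil => intro i j k; simp
  | cons x t ih =>
    intro i j k
    rcases pvMod3_cases x with h | h | h <;>
      simp only [List.foldl_cons, List.map_cons, List.count_cons, h, beq_iff_eq, reduceIte] <;>
      rw [ih] <;> simp only [Prod.mk.injEq] <;>
      refine ⟨by push_cast; omega, by push_cast; omega, by push_cast; omega⟩

-- A's dict comprehension, read back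
lemma pvRange3 : PySem.List.pyRange 0 3 1 = [0, 1, 2] := by decide

-- ===== VERDICT (by name: the statement is the Claim_ definition above) =====
theorem stoneGameIX_spec : Claim_equal_stoneGameIX := by
  intro stones _
  unfold Spec_stoneGameIX stoneGameIX stoneGameIX_alt
  set trimmed := stones.map (fun x => PySem.Int.mod x 3) with htr
  set a : Int := (trimmed.count 0 : Int)
  set b : Int := (trimmed.count 1 : Int)
  set c : Int := (trimmed.count 2 : Int)
  have hsum : a + b + c = (stones.length : Int) := pvCount_sum stones
  have hdict : ((PySem.List.pyRange 0 3 1).map (fun x => x)).foldl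
      (fun d k => d.insert k ((trimmed.count k : Int))) PySem.Dict.empty
      = ((PySem.Dict.empty.insert 0 a).insert 1 b).insert 2 c := by
    rw [pvRange3]; rfl
  simp only [hdict, pvLoopA_eq_pvLoopT]
  have hget : (((PySem.Dict.empty.insert (0:Int) a).insert 1 b).insert 2 c).getD 0 0 = a ∧
      (((PySem.Dict.empty.insert (0:Int) a).insert 1 b).insert 2 c).getD 1 0 = b ∧
      (((PySem.Dict.empty.insert (0:Int) a).insert 1 b).insert 2 c).getD 2 0 = c := by
    refine ⟨?_, ?_, ?_⟩ <;> simp [PySem.Dict.getD_insert]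
  rw [hget.1, hget.2.1, hget.2.2]
  rw [pvLoopT_zero stones.length a b c (by positivity) (by positivity) (by positivity) (by omega)]
  rw [pvFold_counts stones 0 0 0]
  simp only [zero_add]
  rfl
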